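-- pv_equiv track=rewrite | github.com/Artem-Efremov/CodeWars | Arrays/Sorting Replace/6kyu_Infected Zeroes.py | infected_zeroes
-- ===== SOURCE A (Python) =====
-- def infected_zeroes(lst):
--     txt = ''.join(str(i) for i in lst)
--     healthy = txt.split('0')
--     a = []
--     for i in healthy:
--         a.append(len(i) + 1)
--     start = txt.find('0') * 2
--     end = txt[::-1].find('0') * 2
--     b = [start, end]
--     return max(a + b) // 2
-- ===== SOURCE B (Python) =====
-- def infected_zeroes(lst):
--     txt = ''.join(str(i) for i in lst)
--     positions = [i for i, c in enumerate(txt) if c == '0']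
--     if not positions:
--         return (len(txt) + 1) // 2
--     best = max(positions[0], len(txt) - 1 - positions[-1])
--     for x, y in zip(positions, positions[1:]):
--         best = max(best, (y - x) // 2)
--     return best
-- ===== Notes on version B (the rewrite author's own statement) =====
-- stated objective: alternative
-- what changed: B replaces A's split-into-pieces with per-piece edge doubling and a single trailing //2 by collecting the zero positions in one scan and taking a running max of the edge distances and per-gap ceilings (y-x)//2 over consecutive position pairs.
import Mathlib
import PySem

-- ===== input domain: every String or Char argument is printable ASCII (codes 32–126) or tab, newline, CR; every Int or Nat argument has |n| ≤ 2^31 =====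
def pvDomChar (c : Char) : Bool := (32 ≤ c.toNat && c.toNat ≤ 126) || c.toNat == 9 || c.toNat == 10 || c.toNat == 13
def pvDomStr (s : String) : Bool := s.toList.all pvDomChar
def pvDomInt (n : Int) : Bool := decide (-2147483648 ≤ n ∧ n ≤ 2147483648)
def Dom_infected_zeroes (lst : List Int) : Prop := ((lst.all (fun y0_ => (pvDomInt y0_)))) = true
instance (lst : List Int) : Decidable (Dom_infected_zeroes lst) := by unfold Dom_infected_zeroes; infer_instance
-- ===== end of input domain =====

-- B replaces A's split-into-pieces + doubled-edge trick + single trailing //2 by a direct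
-- scan over the zero positions, taking per-gap ceilings; alternative decomposition, same cost.

-- ===== PORT A =====
def infected_zeroes (lst : List Int) : Int :=
  let txt : List Char := PySem.Chars.join [] (lst.map PySem.Int.toChars)
  let healthy := PySem.Chars.splitOn txt ['0']
  let a : List Int := healthy.foldl (fun acc i => acc ++ [(i.length : Int) + 1]) []
  let start := PySem.Chars.find txt ['0'] * 2
  let «end» := PySem.Chars.find ((PySem.List.slice? txt none none (-1)).getD []) ['0'] * 2
  let b : List Int := [start, «end»]
  PySem.Int.floordiv ((PySem.List.max? (a ++ b) (fun x => x)).getD 0) 2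

-- ===== PORT B =====
def infected_zeroes_alt (lst : List Int) : Int :=
  let txt : List Char := PySem.Chars.join [] (lst.map PySem.Int.toChars)
  let positions : List Int :=
    (PySem.List.enumerate txt 0).foldl (fun acc p => if p.2 == '0' then acc ++ [p.1] else acc) []
  match positions with
  | [] => PySem.Int.floordiv ((txt.length : Int) + 1) 2
  | p0 :: rest =>
    let best := max p0 ((txt.length : Int) - 1 - (p0 :: rest).getLast (by simp))
    ((p0 :: rest).zip (PySem.List.slice (p0 :: rest) (some 1))).foldl
      (fun b xy => max b (PySem.Int.floordiv (xy.2 - xy.1) 2)) best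

-- ===== PRECONDITION & SPEC =====
def Spec_infected_zeroes (lst : List Int) (out : Int) : Prop := out = infected_zeroes_alt lst
instance (lst : List Int) (out : Int) : Decidable (Spec_infected_zeroes lst out) := by unfold Spec_infected_zeroes; infer_instance

-- ===== CLAIM (what is proved, stated in full; the proofs are below) =====
def Claim_equal_infected_zeroes : Prop := ∀ (lst : List Int), Dom_infected_zeroes lst → Spec_infected_zeroes lst (infected_zeroes lst)

-- ===== LEMMAS AND PROOFS =====

/-- Structural model of `txt.split('0')` (split on the single character '0'). -/
def mySplit : List Char → List (List Char)
  | [] => [[]]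
  | c :: t => if c = '0' then [] :: mySplit t
              else match mySplit t with
                   | [] => [[c]]
                   | h :: r => (c :: h) :: r

def consHead (x : List Char) : List (List Char) → List (List Char)
  | [] => [x]
  | h :: t => (x ++ h) :: t

theorem mySplit_ne_nil (cs : List Char) : mySplit cs ≠ [] := by
  cases cs with
  | nil => simp [mySplit]
  | cons c t =>
    simp only [mySplit]
    split <;> try simp
    split <;> simp

theorem go_inv : ∀ (fuel : Nat) (l cur : List Char) (acc : List (List Char)),
    l.length < fuel →
    PySem.Chars.splitOn.go ['0'] fuel l cur acc =
      acc.reverse ++ consHead cur.reverse (mySplit l) := by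
  intro fuel
  induction fuel with
  | zero => intro l cur acc h; omega
  | succ n ih =>
    intro l cur acc h
    cases l with
    | nil => simp [PySem.Chars.splitOn.go, mySplit, consHead]
    | cons c rest =>
      rw [PySem.Chars.splitOn.go]
      by_cases hc : c = '0'
      · subst hc
        have hpre : List.isPrefixOf ['0'] ('0' :: rest) = true := by
          simp [List.isPrefixOf]
        simp only [hpre, if_true]
        rw [ih _ _ _ (by simpa using Nat.lt_of_succ_lt_succ h)]
        rcases hM : mySplit rest with _ | ⟨mh, mt⟩
        · exact absurd hM (mySplit_ne_nil rest)
        · simp [mySplit, consHead, hM]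
      · have hpre : List.isPrefixOf ['0'] (c :: rest) = false := by
          simp [List.isPrefixOf]; intro hh; exact hc hh.symm
        simp only [hpre]
        rw [if_neg (by simp)]
        rw [ih _ _ _ (by simpa using Nat.lt_of_succ_lt_succ h)]
        rcases hM : mySplit rest with _ | ⟨mh, mt⟩
        · exact absurd hM (mySplit_ne_nil rest)
        · simp [mySplit, consHead, hM, hc]

theorem splitOn_eq (cs : List Char) : PySem.Chars.splitOn cs ['0'] = mySplit cs := by
  rw [PySem.Chars.splitOn, go_inv _ _ _ _ (by omega)]
  rcases hM : mySplit cs with _ | ⟨mh, mt⟩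
  · exact absurd hM (mySplit_ne_nil cs)
  · simp [consHead]

theorem find_go_eq : ∀ (l : List Char) (k : Nat),
    PySem.Chars.find.go ['0'] l k =
      if '0' ∈ l then (k : Int) + ((mySplit l).headI).length else -1 := by
  intro l
  induction l with
  | nil => intro k; simp [PySem.Chars.find.go]
  | cons c rest ih =>
    intro k
    rw [PySem.Chars.find.go]
    by_cases hc : c = '0'
    · subst hc
      simp [List.isPrefixOf, mySplit]
    · have hpre : List.isPrefixOf ['0'] (c :: rest) = false := by
        simp [List.isPrefixOf]; intro hh; exact hc hh.symm
      simp only [hpre, Bool.false_eq_true, if_false, ih (k + 1)]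
      rcases hM : mySplit rest with _ | ⟨mh, mt⟩
      · exact absurd hM (mySplit_ne_nil rest)
      · by_cases hm : '0' ∈ rest
        · simp [List.mem_cons, hc, hm, mySplit, hM]
          ring
        · simp [List.mem_cons, hm, eq_comm (a := '0') (b := c), hc]

theorem find_eq' (cs : List Char) :
    PySem.Chars.find cs ['0'] =
      if '0' ∈ cs then (((mySplit cs).headI).length : Int) else -1 := by
  rw [PySem.Chars.find, find_go_eq]; simp

theorem mySplit_of_not_mem {cs : List Char} (h : '0' ∉ cs) : mySplit cs = [cs] := by
  induction cs with
  | nil => rfl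
  | cons c t ih =>
    have hc : c ≠ '0' := fun hh => h (hh ▸ List.mem_cons_self)
    have ht : '0' ∉ t := fun hh => h (List.mem_cons_of_mem _ hh)
    simp [mySplit, hc, ih ht]

theorem mySplit_of_mem {cs : List Char} (h : '0' ∈ cs) :
    ∃ p ps, mySplit cs = p :: ps ∧ ps ≠ [] := by
  induction cs with
  | nil => cases h
  | cons c t ih =>
    by_cases hc : c = '0'
    · subst hc
      rcases hM : mySplit t with _ | ⟨mh, mt⟩
      · exact absurd hM (mySplit_ne_nil t)
      · exact ⟨[], mh :: mt, by simp [mySplit, hM], by simp⟩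
    · have ht : '0' ∈ t := by
        rcases List.mem_cons.1 h with hh | hh
        · exact absurd hh.symm hc
        · exact hh
      obtain ⟨p, ps, hM, hps⟩ := ih ht
      exact ⟨c :: p, ps, by simp [mySplit, hc, hM], hps⟩

theorem mySplit_append_zero (xs : List Char) :
    mySplit (xs ++ ['0']) = mySplit xs ++ [[]] := by
  induction xs with
  | nil => rfl
  | cons c t ih =>
    by_cases hc : c = '0'
    · simp [mySplit, hc, ih]
    · rcases hM : mySplit t with _ | ⟨mh, mt⟩
      · exact absurd hM (mySplit_ne_nil t)
      · simp [mySplit, hc, ih, hM]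

theorem mySplit_append_ne {c : Char} (hc : c ≠ '0') (xs : List Char) :
    mySplit (xs ++ [c]) =
      (mySplit xs).dropLast ++ [(mySplit xs).getLast (mySplit_ne_nil xs) ++ [c]] := by
  induction xs with
  | nil => simp [mySplit, hc]
  | cons d t ih =>
    by_cases hd : d = '0'
    · subst hd
      rcases hM : mySplit t with _ | ⟨mh, mt⟩
      · exact absurd hM (mySplit_ne_nil t)
      · simp [mySplit, ih, hM, List.getLast_cons]
    · rcases hM : mySplit t with _ | ⟨mh, mt⟩
      · exact absurd hM (mySplit_ne_nil t)
      · rcases mt with _ | ⟨m2, mt2⟩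
        · simp [mySplit, hd, ih, hM]
        · simp [mySplit, hd, ih, hM, List.getLast_cons]

theorem mySplit_reverse (cs : List Char) :
    mySplit cs.reverse = ((mySplit cs).map List.reverse).reverse := by
  induction cs with
  | nil => rfl
  | cons c t ih =>
    by_cases hc : c = '0'
    · subst hc
      simp only [List.reverse_cons, mySplit_append_zero, ih, mySplit]
      simp
    · rcases hM : mySplit t with _ | ⟨mh, mt⟩
      · exact absurd hM (mySplit_ne_nil t)
      · simp only [List.reverse_cons, mySplit_append_ne hc, ih, hM]
        simp only [List.map_cons, List.reverse_cons, List.dropLast_concat]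
        simp [mySplit, hc, hM]

theorem headI_length_mySplit_reverse (cs : List Char) :
    (((mySplit cs.reverse).headI).length : Int) =
      (((mySplit cs).getLast (mySplit_ne_nil cs)).length : Int) := by
  rw [mySplit_reverse]
  have h := List.dropLast_append_getLast (mySplit_ne_nil cs)
  conv_lhs => rw [← h]
  simp

/-- Positions of the '0's of the joined text, computed from the split pieces:
one position per piece boundary (running offset `s`). -/
def posOf : List (List Char) → Int → List Int
  | [], _ => []
  | _ :: [], _ => []
  | p :: q :: ps, s => (s + p.length) :: posOf (q :: ps) (s + p.length + 1)

theorem posOf_eq : ∀ (cs : List Char) (s : Int),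
    ((PySem.List.enumerate cs s).filter (fun p => p.2 == '0')).map (·.1) =
      posOf (mySplit cs) s := by
  intro cs
  induction cs with
  | nil => intro s; simp [PySem.List.enumerate_nil, mySplit, posOf]
  | cons c t ih =>
    intro s
    rw [PySem.List.enumerate_cons]
    by_cases hc : c = '0'
    · subst hc
      rcases hM : mySplit t with _ | ⟨mh, mt⟩
      · exact absurd hM (mySplit_ne_nil t)
      · simp only [List.filter_cons, mySplit, hM]
        simp [posOf, ih, hM]
    · rcases hM : mySplit t with _ | ⟨mh, mt⟩
      · exact absurd hM (mySplit_ne_nil t)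
      · have hcb : (c == '0') = false := by simp [hc]
        rcases mt with _ | ⟨m2, mt2⟩
        · simp only [List.filter_cons, hcb, mySplit, hc, if_false, hM]
          simp [posOf, ih, hM]
        · simp only [List.filter_cons, hcb, mySplit, hc, if_false, hM]
          simp only [if_false, Bool.false_eq_true, ih, hM, posOf, List.cons.injEq]
          refine ⟨by push_cast [List.length_cons]; ring, ?_⟩
          congr 1
          push_cast [List.length_cons]; ring

/-- Length of the joined text, from the pieces: sum of lengths plus one '0' per boundary. -/
def ILenI (P : List (List Char)) : Int := (P.map (fun x => (x.length : Int))).sum + P.length - 1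

theorem len_eq_ILenI (cs : List Char) : (cs.length : Int) = ILenI (mySplit cs) := by
  induction cs with
  | nil => simp [mySplit, ILenI]
  | cons c t ih =>
    by_cases hc : c = '0'
    · simp only [mySplit, hc, ILenI] at *
      simp at *; omega
    · rcases hM : mySplit t with _ | ⟨mh, mt⟩
      · exact absurd hM (mySplit_ne_nil t)
      · simp only [mySplit, hc, if_false, hM, ILenI] at *
        simp at *; omega

theorem posOf_lastPos : ∀ (ps : List (List Char)) (p : List Char) (s : Int) (h : ps ≠ []),
    (posOf (p :: ps) s).getLast? =
      some (s + ILenI (p :: ps) - (ps.getLast h).length - 1) := by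
  intro ps
  induction ps with
  | nil => intro p s h; exact absurd rfl h
  | cons q ps' ih =>
    intro p s h
    rcases ps' with _ | ⟨q', ps''⟩
    · simp [posOf, ILenI]; ring
    · have hih := ih q (s + p.length + 1) (by simp)
      rw [posOf] at hih
      rw [posOf, posOf, List.getLast?_cons_cons, hih]
      congr 1
      simp only [List.getLast_cons_cons]
      simp [ILenI]
      ring

theorem posOf_diffs : ∀ (ps : List (List Char)) (p : List Char) (s : Int),
    ((posOf (p :: ps) s).zip ((posOf (p :: ps) s).drop 1)).map (fun xy => xy.2 - xy.1) =
      ps.dropLast.map (fun x => (x.length : Int) + 1) := by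
  intro ps
  induction ps with
  | nil => intro p s; simp [posOf]
  | cons q ps' ih =>
    intro p s
    rcases ps' with _ | ⟨q', ps''⟩
    · simp [posOf]
    · rw [posOf, posOf]
      have hih := ih q (s + p.length + 1)
      rw [posOf] at hih
      simp only [List.drop_succ_cons, List.drop_zero, List.zip_cons_cons, List.map_cons,
        List.dropLast_cons₂]
      refine congrArg₂ List.cons (by ring) ?_
      simpa [List.map_dropLast] using hih

theorem fdiv2_mono {a b : Int} (h : a ≤ b) :
    PySem.Int.floordiv a 2 ≤ PySem.Int.floordiv b 2 := by
  rw [PySem.Int.floordiv_eq_ediv_of_pos (by norm_num),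
      PySem.Int.floordiv_eq_ediv_of_pos (by norm_num)]
  omega

theorem fdiv2_two_mul (x : Int) : PySem.Int.floordiv (x * 2) 2 = x := by
  rw [PySem.Int.floordiv_eq_ediv_of_pos (by norm_num)]
  omega

theorem fdiv2_succ_le {x : Int} (hx : 0 ≤ x) : PySem.Int.floordiv (x + 1) 2 ≤ x := by
  rw [PySem.Int.floordiv_eq_ediv_of_pos (by norm_num)]
  omega

/-- Max of pieces-with-edges, halved, equals the position-scan's running max. -/
theorem final_max (I : List (List Char)) (p pk : List Char) :
    PySem.Int.floordiv
      ((List.map (fun x => (x.length : Int) + 1) (I ++ [pk]) ++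
        [(p.length : Int) * 2, (pk.length : Int) * 2]).foldl max ((p.length : Int) + 1)) 2 =
    ((I.map (fun x => (x.length : Int) + 1)).map (fun d => PySem.Int.floordiv d 2)).foldl max
      (max (p.length : Int) (pk.length : Int)) := by
  set T0 : List Int := List.map (fun x => (x.length : Int) + 1) (I ++ [pk]) ++
      [(p.length : Int) * 2, (pk.length : Int) * 2] with hT0
  set T : List Int := (I.map (fun x => (x.length : Int) + 1)).map (fun d => PySem.Int.floordiv d 2) with hT
  obtain ⟨hA1, hA2⟩ := PySem.List.le_foldl_max T0 ((p.length : Int) + 1)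
  have hAmem := PySem.List.foldl_max_mem T0 ((p.length : Int) + 1)
  obtain ⟨hB1, hB2⟩ := PySem.List.le_foldl_max T (max (p.length : Int) (pk.length : Int))
  have hBmem := PySem.List.foldl_max_mem T (max (p.length : Int) (pk.length : Int))
  set M := T0.foldl max ((p.length : Int) + 1) with hMdef
  set Bv := T.foldl max (max (p.length : Int) (pk.length : Int)) with hBdef
  have hplB : (p.length : Int) ≤ Bv := le_trans (le_max_left _ _) hB1
  have hpkB : (pk.length : Int) ≤ Bv := le_trans (le_max_right _ _) hB1
  have hintB : ∀ x ∈ I, PySem.Int.floordiv ((x.length : Int) + 1) 2 ≤ Bv := by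
    intro x hx
    refine hB2 _ ?_
    rw [hT]
    exact List.mem_map.2 ⟨_, List.mem_map.2 ⟨x, hx, rfl⟩, rfl⟩
  have hplM : (p.length : Int) * 2 ≤ M := hA2 _ (by simp [hT0])
  have hpkM : (pk.length : Int) * 2 ≤ M := hA2 _ (by simp [hT0])
  apply le_antisymm
  · rcases hAmem with hM0 | hMm
    · rw [hM0]
      exact le_trans (fdiv2_succ_le (by positivity)) (le_trans (le_max_left _ _) hB1)
    · rw [hT0] at hMm
      rcases List.mem_append.1 hMm with h1 | h2
      · obtain ⟨x, hx, hMx⟩ := List.mem_map.1 h1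
        rcases List.mem_append.1 hx with hxI | hxpk
        · exact hMx ▸ hintB x hxI
        · rw [← hMx, List.mem_singleton.1 hxpk]
          exact le_trans (fdiv2_succ_le (by positivity)) hpkB
      · rcases List.mem_cons.1 h2 with hM1 | h3
        · rw [hM1, fdiv2_two_mul]; exact hplB
        · rw [List.mem_singleton.1 h3, fdiv2_two_mul]; exact hpkB
  · rcases hBmem with hB0 | hBm
    · rw [hB0]
      apply max_le
      · rw [← fdiv2_two_mul (p.length : Int)]; exact fdiv2_mono hplM
      · rw [← fdiv2_two_mul (pk.length : Int)]; exact fdiv2_mono hpkM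
    · rw [hT] at hBm
      simp only [List.mem_map] at hBm
      obtain ⟨d, ⟨x, hxI, hdx⟩, hBd⟩ := hBm
      rw [← hBd, ← hdx]
      apply fdiv2_mono
      refine hA2 _ ?_
      rw [hT0]
      exact List.mem_append.2 (Or.inl (List.mem_map.2 ⟨x, List.mem_append.2 (Or.inl hxI), rfl⟩))

/-- The core equivalence: both bodies agree for every joined character list. -/
theorem core (cs : List Char) :
    PySem.Int.floordiv
      ((PySem.List.max?
        ((PySem.Chars.splitOn cs ['0']).foldl (fun acc i => acc ++ [(i.length : Int) + 1]) [] ++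
          [PySem.Chars.find cs ['0'] * 2,
           PySem.Chars.find ((PySem.List.slice? cs none none (-1)).getD []) ['0'] * 2])
        (fun x => x)).getD 0) 2 =
    (match (PySem.List.enumerate cs 0).foldl
        (fun acc p => if p.2 == '0' then acc ++ [p.1] else acc) [] with
     | [] => PySem.Int.floordiv ((cs.length : Int) + 1) 2
     | p0 :: rest =>
       ((p0 :: rest).zip (PySem.List.slice (p0 :: rest) (some 1))).foldl
         (fun b xy => max b (PySem.Int.floordiv (xy.2 - xy.1) 2))
         (max p0 ((cs.length : Int) - 1 - (p0 :: rest).getLast (by simp)))) := by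
  rw [PySem.List.slice?_none_none_neg_one]
  simp only [Option.getD_some]
  rw [splitOn_eq, find_eq', find_eq', PySem.List.foldl_append_singleton_eq_map,
      PySem.List.foldl_append_if (p := fun p : Int × Char => p.2 == '0') (f := fun p : Int × Char => p.1),
      posOf_eq]
  simp only [List.nil_append, List.mem_reverse]
  by_cases h0 : '0' ∈ cs
  · obtain ⟨p, ps, hM, hps⟩ := mySplit_of_mem h0
    rcases ps with _ | ⟨q, ps'⟩
    · exact absurd rfl hps
    have hhead : (mySplit cs).headI = p := by rw [hM]; rfl
    have hlastM : (mySplit cs).getLast (mySplit_ne_nil cs) = (q :: ps').getLast (by simp) := by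
      rw [List.getLast_congr (mySplit_ne_nil cs) (by simp) hM, List.getLast_cons_cons]
    have hrev : (((mySplit cs.reverse).headI).length : Int) =
        (((q :: ps').getLast (by simp)).length : Int) := by
      rw [headI_length_mySplit_reverse, hlastM]
    rw [if_pos h0, if_pos h0, hrev, hhead, hM, posOf]
    simp only [zero_add]
    set pk : List Char := (q :: ps').getLast (by simp) with hpk
    set P' : List Int := posOf (q :: ps') ((p.length : Int) + 1) with hP'
    -- the last zero position
    have hlast? := posOf_lastPos (q :: ps') p 0 (by simp)
    rw [posOf] at hlast?
    simp only [zero_add, ← hpk, ← hP'] at hlast?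
    have hlast : ((p.length : Int) :: P').getLast (by simp) =
        ILenI (p :: q :: ps') - (pk.length : Int) - 1 := by
      rw [List.getLast?_eq_some_getLast (l := (p.length : Int) :: P') (by simp)] at hlast?
      exact Option.some.inj hlast?
    have hn : (cs.length : Int) = ILenI (p :: q :: ps') := by rw [len_eq_ILenI, hM]
    have hbest : (cs.length : Int) - 1 - (((p.length : Int) :: P').getLast (by simp)) =
        (pk.length : Int) := by rw [hlast, hn]; ring
    rw [hbest]
    -- the slice positions[1:]
    rw [PySem.List.slice_from _ (by norm_num : (0 : Int) ≤ 1)]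
    simp only [show ((1 : Int)).toNat = 1 from rfl, List.drop_one, List.tail_cons]
    -- fold over the zip as a running max over the gap list
    have hfold : ∀ (init : Int) (L : List (Int × Int)),
        L.foldl (fun b xy => max b (PySem.Int.floordiv (xy.2 - xy.1) 2)) init =
          (L.map (fun xy => PySem.Int.floordiv (xy.2 - xy.1) 2)).foldl max init := by
      intro init L
      rw [List.foldl_map]
    rw [hfold]
    have hdiffs := posOf_diffs (q :: ps') p 0
    rw [posOf] at hdiffs
    simp only [zero_add, ← hP', List.drop_one, List.tail_cons] at hdiffs
    have hzipmap : ((((p.length : Int)) :: P').zip P').map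
          (fun xy => PySem.Int.floordiv (xy.2 - xy.1) 2) =
        (((((p.length : Int)) :: P').zip P').map (fun xy => xy.2 - xy.1)).map
          (fun d => PySem.Int.floordiv d 2) := by
      rw [List.map_map]; rfl
    rw [hzipmap, hdiffs]
    -- the max? of A's candidate list
    have hsplitlast : q :: ps' = (q :: ps').dropLast ++ [pk] :=
      (List.dropLast_append_getLast (by simp)).symm
    rw [show (p :: q :: ps') = p :: ((q :: ps').dropLast ++ [pk]) by rw [← hsplitlast]]
    simp only [List.map_cons, List.cons_append]
    rw [PySem.List.max?_id_cons, Option.getD_some]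
    exact final_max ((q :: ps').dropLast) p pk
  · rw [mySplit_of_not_mem h0, if_neg h0, if_neg h0]
    simp only [posOf]
    have hlen : (0 : Int) ≤ (cs.length : Int) := by positivity
    simp only [List.map_cons, List.map_nil, List.cons_append, List.nil_append]
    rw [PySem.List.max?_id_cons]
    simp only [Option.getD_some, List.foldl_cons, List.foldl_nil]
    have : max (max ((cs.length : Int) + 1) (-1 * 2)) (-1 * 2) = (cs.length : Int) + 1 := by
      omega
    rw [this]

-- ===== VERDICT (by name: the statement is the Claim_ definition above) =====
theorem infected_zeroes_spec : Claim_equal_infected_zeroes := by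
  intro lst _
  unfold Spec_infected_zeroes infected_zeroes infected_zeroes_alt
  exact core _
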